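-- pv_equiv track=rewrite | github.com/EugeneAllison/Leetcode_advancer | 0.0.0. Amazon test.py | makePowerNonDecreasing
-- ===== SOURCE A (Python) =====
-- def makePowerNonDecreasing(power):
--     n = len(power)
--     total_increase = 0
--
--     for i in range(1, n):
--         if power[i] < power[i - 1]:
--             increase = power[i - 1] - power[i]
--             for j in range(i, n):
--                 power[j] += increase
--             total_increase += increase
--
--     return total_increase
-- ===== SOURCE B (Python) =====
-- def makePowerNonDecreasing(power):
--     # One pass: a suffix-add never changes later adjacent differences,
--     # so the answer is the sum of the positive drops between neighbours.
--     total = 0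
--     for prev, cur in zip(power, power[1:]):
--         if cur < prev:
--             total += prev - cur
--     return total
-- ===== Notes on version B (the rewrite author's own statement) =====
-- stated objective: faster
-- what changed: Replaced the quadratic loop that physically adds the increase to every suffix element with a single pass summing the positive drops between adjacent elements (suffix-adds never change later differences); B also does not mutate the input list.
import Mathlib
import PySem

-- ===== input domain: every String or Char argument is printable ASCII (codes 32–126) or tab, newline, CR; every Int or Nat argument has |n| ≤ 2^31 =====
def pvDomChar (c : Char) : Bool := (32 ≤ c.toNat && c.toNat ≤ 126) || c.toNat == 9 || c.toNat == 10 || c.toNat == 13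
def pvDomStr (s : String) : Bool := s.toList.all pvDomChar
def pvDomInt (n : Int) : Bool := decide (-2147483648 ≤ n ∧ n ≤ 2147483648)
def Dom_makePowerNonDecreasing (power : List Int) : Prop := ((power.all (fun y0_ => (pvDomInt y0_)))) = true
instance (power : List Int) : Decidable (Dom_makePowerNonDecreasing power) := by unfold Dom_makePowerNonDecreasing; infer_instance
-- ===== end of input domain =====

-- B replaces A's quadratic suffix-mutation loop with one pass summing the positive adjacent drops
-- (objective: faster). A mutates its argument in place; B does not — the equivalence proved is about
-- the RETURN value only.

-- ===== PORT A =====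
-- body of A's outer loop (n is the let-bound len(power); the inner 'for j in range(i, n)' is the nested foldl)
def stepA (n : Int) (st : List Int × Int) (i : Int) : List Int × Int :=
  if PySem.List.pyGetD st.1 i 0 < PySem.List.pyGetD st.1 (i - 1) 0 then
    let inc := PySem.List.pyGetD st.1 (i - 1) 0 - PySem.List.pyGetD st.1 i 0
    ((PySem.List.pyRange i n 1).foldl
        (fun q j => PySem.List.pySetD q j (PySem.List.pyGetD q j 0 + inc)) st.1,
     st.2 + inc)
  else st

def makePowerNonDecreasing (power : List Int) : Int :=
  let n : Int := power.length
  ((PySem.List.pyRange 1 n 1).foldl (stepA n) (power, 0)).2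

-- ===== PORT B =====
def makePowerNonDecreasing_alt (power : List Int) : Int :=
  (power.zip (PySem.List.slice power (some 1) none)).foldl
    (fun t pc => if pc.2 < pc.1 then t + (pc.1 - pc.2) else t) 0

-- ===== PRECONDITION & SPEC =====
def Spec_makePowerNonDecreasing (power : List Int) (out : Int) : Prop := out = makePowerNonDecreasing_alt power
instance (power : List Int) (out : Int) : Decidable (Spec_makePowerNonDecreasing power out) := by unfold Spec_makePowerNonDecreasing; infer_instance

-- ===== CLAIM (what is proved, stated in full; the proofs are below) =====
def Claim_equal_makePowerNonDecreasing : Prop := ∀ (power : List Int), Dom_makePowerNonDecreasing power → Spec_makePowerNonDecreasing power (makePowerNonDecreasing power)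

-- ===== LEMMAS AND PROOFS =====

-- sum of the positive drops between adjacent elements
def drops : List Int → Int
  | a :: b :: rest => (if b < a then a - b else 0) + drops (b :: rest)
  | _ => 0

theorem drops_short (l : List Int) (h : l.length ≤ 1) : drops l = 0 := by
  match l, h with
  | [], _ => rfl
  | [a], _ => rfl

theorem drops_map_add (c : Int) : ∀ (l : List Int), drops (l.map (· + c)) = drops l
  | [] => rfl
  | [a] => rfl
  | a :: b :: rest => by
      have ih := drops_map_add c (b :: rest)
      simp only [List.map, drops] at ih ⊢
      rw [ih]
      split_ifs with h1 h2 <;> omega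

-- B's zip-fold computes `drops`
theorem zipFold_eq_drops : ∀ (l : List Int) (t : Int),
    (l.zip l.tail).foldl (fun t pc => if pc.2 < pc.1 then t + (pc.1 - pc.2) else t) t = t + drops l
  | [], t => by simp [drops]
  | [a], t => by simp [drops]
  | a :: b :: rest, t => by
      have ih := zipFold_eq_drops (b :: rest) (if b < a then t + (a - b) else t)
      simp only [List.zip_cons_cons, List.tail_cons, List.foldl_cons] at ih ⊢
      rw [ih]
      simp only [drops]
      split_ifs with h <;> omega

theorem alt_eq_drops (power : List Int) : makePowerNonDecreasing_alt power = drops power := by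
  unfold makePowerNonDecreasing_alt
  rw [PySem.List.slice_from_one, zipFold_eq_drops]
  omega

-- A's inner loop adds `inc` to the whole suffix starting at index i
theorem innerLoop_eq : ∀ (k : Nat) (l : List Int) (i : Nat) (inc : Int), l.length - i = k →
    (PySem.List.pyRange (i : Int) (l.length : Int) 1).foldl
        (fun q j => PySem.List.pySetD q j (PySem.List.pyGetD q j 0 + inc)) l
      = l.take i ++ (l.drop i).map (· + inc)
  | 0, l, i, inc, hk => by
      have hle : l.length ≤ i := by omega
      rw [PySem.List.pyRange_one_eq_nil (by exact_mod_cast hle)]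
      simp [List.take_of_length_le hle, List.drop_of_length_le hle]
  | k + 1, l, i, inc, hk => by
      have hi : i < l.length := by omega
      rw [PySem.List.pyRange_one_cons (by exact_mod_cast hi)]
      simp only [List.foldl_cons]
      rw [PySem.List.pyGetD_natCast, PySem.List.pySetD_natCast]
      have hlen : (l.set i (l.getD i 0 + inc)).length = l.length := by simp
      have hcast : ((i : Int) + 1) = ((i + 1 : Nat) : Int) := by push_cast; ring
      have ih := innerLoop_eq k (l.set i (l.getD i 0 + inc)) (i + 1) inc (by omega)
      rw [hlen] at ih
      rw [hcast, ih]
      have hset : l.set i (l.getD i 0 + inc) = l.take i ++ (l[i] + inc) :: l.drop (i + 1) := by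
        rw [List.set_eq_take_append_cons_drop, if_pos hi, List.getD_eq_getElem l 0 hi]
      rw [hset]
      have hlt : (l.take i).length = i := by simp [Nat.min_eq_left (Nat.le_of_lt hi)]
      rw [List.take_append, List.drop_append, hlt]
      have e1 : (List.take i l).take (i + 1) = List.take i l := List.take_of_length_le (by omega)
      have e2 : i + 1 - i = 1 := by omega
      have e3 : (List.take i l).drop (i + 1) = [] := List.drop_eq_nil_of_le (by omega)
      rw [e1, e2, e3, List.drop_eq_getElem_cons hi]
      simp
      rw [List.drop_eq_getElem_cons (show i < (List.map (fun x => x + inc) l).length by simpa using hi)]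
      simp

-- A's outer loop from index i accumulates the positive drops of l from position i-1 on
theorem outerLoop_eq : ∀ (k : Nat) (l : List Int) (i : Nat) (t : Int), l.length - i = k → 1 ≤ i →
    ((PySem.List.pyRange (i : Int) (l.length : Int) 1).foldl (stepA (l.length : Int)) (l, t)).2
      = t + drops (l.drop (i - 1))
  | 0, l, i, t, hk, hi1 => by
      have hle : l.length ≤ i := by omega
      rw [PySem.List.pyRange_one_eq_nil (by exact_mod_cast hle)]
      have : (l.drop (i - 1)).length ≤ 1 := by simp; omega
      simp [drops_short _ this]
  | k + 1, l, i, t, hk, hi1 => by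
      have hi : i < l.length := by omega
      have hi1' : i - 1 < l.length := by omega
      rw [PySem.List.pyRange_one_cons (by exact_mod_cast hi)]
      simp only [List.foldl_cons]
      have hdrop : l.drop (i - 1) = l[i - 1] :: l[i] :: l.drop (i + 1) := by
        rw [List.drop_eq_getElem_cons hi1']
        have : i - 1 + 1 = i := by omega
        rw [this, List.drop_eq_getElem_cons hi]
      have hcastm : ((i : Int) - 1) = ((i - 1 : Nat) : Int) := by omega
      by_cases hcond : l[i] < l[i - 1]
      · -- the branch fires: the suffix from i is shifted up by inc
        have hstep : stepA (l.length : Int) (l, t) (i : Int)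
            = (l.take i ++ (l.drop i).map (· + (l[i - 1] - l[i])), t + (l[i - 1] - l[i])) := by
          unfold stepA
          simp only [hcastm, PySem.List.pyGetD_natCast,
            List.getD_eq_getElem l 0 hi, List.getD_eq_getElem l 0 hi1']
          rw [if_pos hcond]
          rw [innerLoop_eq (l.length - i) l i (l[i - 1] - l[i]) rfl]
        rw [hstep]
        have hlen' : (l.take i ++ (l.drop i).map (· + (l[i - 1] - l[i]))).length = l.length := by
          simp [Nat.min_eq_left (Nat.le_of_lt hi)]; omega
        have hcast : ((i : Int) + 1) = ((i + 1 : Nat) : Int) := by push_cast; ring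
        have ih := outerLoop_eq k (l.take i ++ (l.drop i).map (· + (l[i - 1] - l[i]))) (i + 1)
            (t + (l[i - 1] - l[i])) (by rw [hlen']; omega) (by omega)
        rw [hlen'] at ih
        rw [hcast, ih]
        have hlt : (l.take i).length = i := by simp [Nat.min_eq_left (Nat.le_of_lt hi)]
        have hdrop' : (l.take i ++ (l.drop i).map (· + (l[i - 1] - l[i]))).drop (i + 1 - 1)
            = (l.drop i).map (· + (l[i - 1] - l[i])) := by
          have : i + 1 - 1 = i := by omega
          rw [this, List.drop_append, hlt]
          simp [List.drop_eq_nil_of_le (le_of_eq hlt)]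
        rw [hdrop', drops_map_add, hdrop]
        have hdi : l.drop i = l[i] :: l.drop (i + 1) := List.drop_eq_getElem_cons hi
        rw [hdi]
        simp only [drops, if_pos hcond]
        ring
      · -- no change at this index
        have hstep : stepA (l.length : Int) (l, t) (i : Int) = (l, t) := by
          unfold stepA
          simp only [hcastm, PySem.List.pyGetD_natCast,
            List.getD_eq_getElem l 0 hi, List.getD_eq_getElem l 0 hi1']
          rw [if_neg hcond]
        rw [hstep]
        have hcast : ((i : Int) + 1) = ((i + 1 : Nat) : Int) := by push_cast; ring
        have ih := outerLoop_eq k l (i + 1) t (by omega) (by omega)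
        rw [hcast, ih]
        have : i + 1 - 1 = i := by omega
        rw [this, hdrop]
        simp only [drops, if_neg hcond]
        have hdi : l.drop i = l[i] :: l.drop (i + 1) := List.drop_eq_getElem_cons hi
        rw [hdi]
        ring

-- ===== VERDICT (by name: the statement is the Claim_ definition above) =====
theorem makePowerNonDecreasing_spec : Claim_equal_makePowerNonDecreasing := by
  intro power _
  unfold Spec_makePowerNonDecreasing makePowerNonDecreasing
  rw [alt_eq_drops]
  have h1 : ((1 : Nat) : Int) = (1 : Int) := by norm_num
  have := outerLoop_eq (power.length - 1) power 1 0 rfl (le_refl 1)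
  rw [h1] at this
  simp only [this]
  simp
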